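-- pv_equiv track=rewrite | github.com/willdickerson/infinitespa | infinite_spa.py | _is_dissonant_with_chord
-- ===== SOURCE A (Python) =====
-- def _is_dissonant_with_chord(note, chord_voicing):
--     """
--     Check if a note creates dissonant intervals with any chord tone.
--     Dissonant intervals are minor 2nds (1 semitone), major 7ths (11 semitones),
--     and tritones (6 semitones).
--     """
--     note_pitch_class = note % 12
--
--     for chord_note in chord_voicing:
--         chord_pitch_class = chord_note % 12
--
--         # Calculate the smallest interval between the two pitch classes
--         interval = min(
--             (note_pitch_class - chord_pitch_class) % 12,
--             (chord_pitch_class - note_pitch_class) % 12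
--         )
--
--         # Check for dissonant intervals
--         if interval == 1:  # Minor 2nd
--             return True
--         if interval == 2:  # Major 2nd
--             return True
--         if interval == 11:  # Major 7th
--             return True
--         if interval == 6:  # Tritone
--             return True
--
--     return False
-- ===== SOURCE B (Python) =====
-- def _is_dissonant_with_chord(note, chord_voicing):
--     # One pass ORs the chord into a 12-bit pitch-class bitmask; the mask is then
--     # rotated by the note's pitch class and tested against the fixed dissonance
--     # pattern 0b110001000110 (offsets 1, 2, 6, 10, 11 semitones).
--     mask = 0
--     for c in chord_voicing:
--         mask |= 1 << (c % 12)
--     npc = note % 12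
--     rotated = ((mask >> npc) | (mask << (12 - npc))) & 0xFFF
--     return rotated & 0b110001000110 != 0
-- ===== Notes on version B (the rewrite author's own statement) =====
-- stated objective: alternative
-- what changed: Replaces the per-tone interval arithmetic with early-return by folding the chord into a 12-bit pitch-class bitmask, rotating it by the note's pitch class, and AND-ing against a fixed dissonance bit pattern.
import Mathlib
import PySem

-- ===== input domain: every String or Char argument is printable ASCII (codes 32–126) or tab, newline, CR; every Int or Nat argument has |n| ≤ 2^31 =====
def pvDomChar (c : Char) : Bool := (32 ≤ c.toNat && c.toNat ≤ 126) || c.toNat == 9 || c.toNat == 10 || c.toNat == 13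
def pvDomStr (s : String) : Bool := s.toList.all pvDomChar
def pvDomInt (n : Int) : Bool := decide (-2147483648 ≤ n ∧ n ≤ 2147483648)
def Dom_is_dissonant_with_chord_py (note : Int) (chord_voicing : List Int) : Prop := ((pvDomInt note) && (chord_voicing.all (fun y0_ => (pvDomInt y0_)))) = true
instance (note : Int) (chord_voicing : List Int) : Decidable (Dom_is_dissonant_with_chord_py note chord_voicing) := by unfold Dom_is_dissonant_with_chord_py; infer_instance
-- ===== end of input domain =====

-- B folds the chord into a 12-bit pitch-class bitmask, rotates it by the note's pitch
-- class and tests a fixed dissonance bit pattern (objective: alternative algorithm).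

-- ===== PORT A =====
-- the for-loop with early returns, as structural recursion over chord_voicing
def pvALoop (note_pitch_class : Int) : List Int → Bool
  | [] => false
  | chord_note :: rest =>
    let chord_pitch_class := PySem.Int.mod chord_note 12
    let interval := min (PySem.Int.mod (note_pitch_class - chord_pitch_class) 12)
                        (PySem.Int.mod (chord_pitch_class - note_pitch_class) 12)
    if interval = 1 then true
    else if interval = 2 then true
    else if interval = 11 then true
    else if interval = 6 then true
    else pvALoop note_pitch_class rest

def is_dissonant_with_chord_py (note : Int) (chord_voicing : List Int) : Bool :=
  let note_pitch_class := PySem.Int.mod note 12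
  pvALoop note_pitch_class chord_voicing

-- ===== PORT B =====
-- `c % 12` with positive divisor is nonnegative in Python, so `.toNat` on the
-- PySem.Int.mod result is exact here (shift amounts in Python are these same values).
def is_dissonant_with_chord_py_alt (note : Int) (chord_voicing : List Int) : Bool :=
  let mask : Nat := chord_voicing.foldl (fun m c => m ||| (1 <<< (PySem.Int.mod c 12).toNat)) 0
  let npc : Nat := (PySem.Int.mod note 12).toNat
  let rotated : Nat := ((mask >>> npc) ||| (mask <<< (12 - npc))) &&& 0xFFF
  decide (rotated &&& 0b110001000110 ≠ 0)

-- ===== PRECONDITION & SPEC =====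
def Spec_is_dissonant_with_chord_py (note : Int) (chord_voicing : List Int) (out : Bool) : Prop := out = is_dissonant_with_chord_py_alt note chord_voicing
instance (note : Int) (chord_voicing : List Int) (out : Bool) : Decidable (Spec_is_dissonant_with_chord_py note chord_voicing out) := by unfold Spec_is_dissonant_with_chord_py; infer_instance

-- ===== CLAIM (what is proved, stated in full; the proofs are below) =====
def Claim_equal_is_dissonant_with_chord_py : Prop := ∀ (note : Int) (chord_voicing : List Int), Dom_is_dissonant_with_chord_py note chord_voicing → Spec_is_dissonant_with_chord_py note chord_voicing (is_dissonant_with_chord_py note chord_voicing)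

-- ===== LEMMAS AND PROOFS =====

-- the per-tone condition of A, keyed by the two pitch classes
def pvChain (a b : Int) : Bool :=
  let interval := min (PySem.Int.mod (a - b) 12) (PySem.Int.mod (b - a) 12)
  interval = 1 ∨ interval = 2 ∨ interval = 11 ∨ interval = 6

lemma pvALoop_eq_any (a : Int) (l : List Int) :
    pvALoop a l = l.any (fun c => pvChain a (PySem.Int.mod c 12)) := by
  induction l with
  | nil => rfl
  | cons c rest ih =>
    rw [List.any_cons, ← ih]
    show (let cpc := PySem.Int.mod c 12;
          let interval := min (PySem.Int.mod (a - cpc) 12) (PySem.Int.mod (cpc - a) 12);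
          if interval = 1 then true
          else if interval = 2 then true
          else if interval = 11 then true
          else if interval = 6 then true
          else pvALoop a rest) = (pvChain a (PySem.Int.mod c 12) || pvALoop a rest)
    simp only [pvChain]
    split_ifs <;> simp_all

lemma pvMod12_bounds (x : Int) : 0 ≤ PySem.Int.mod x 12 ∧ PySem.Int.mod x 12 < 12 := by
  rw [PySem.Int.mod_eq_emod_of_pos (by norm_num)]
  exact ⟨Int.emod_nonneg x (by norm_num), Int.emod_lt_of_pos x (by norm_num)⟩

-- B's single-mask test, as a function of the mask (npc fixed)
def pvF (npc mask : Nat) : Bool :=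
  decide ((((mask >>> npc) ||| (mask <<< (12 - npc))) &&& 0xFFF) &&& 0b110001000110 ≠ 0)

lemma pvF_zero (npc : Nat) : pvF npc 0 = false := by
  simp [pvF]

lemma pvLor_eq_zero (x y : Nat) : (x ||| y = 0) ↔ (x = 0 ∧ y = 0) := by
  constructor
  · intro h
    constructor <;>
    · apply Nat.eq_of_testBit_eq
      intro k
      have := congrArg (fun n => n.testBit k) h
      simp at this
      simp [this]
  · rintro ⟨rfl, rfl⟩
    rfl

lemma pvF_lor (npc x y : Nat) : pvF npc (x ||| y) = (pvF npc x || pvF npc y) := by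
  have h : (((x ||| y) >>> npc ||| (x ||| y) <<< (12 - npc)) &&& 0xFFF) &&& 0b110001000110
      = ((((x >>> npc ||| x <<< (12 - npc)) &&& 0xFFF) &&& 0b110001000110)
        ||| (((y >>> npc ||| y <<< (12 - npc)) &&& 0xFFF) &&& 0b110001000110)) := by
    apply Nat.eq_of_testBit_eq
    intro k
    simp only [Nat.testBit_lor, Nat.testBit_land, Nat.testBit_shiftRight, Nat.testBit_shiftLeft]
    generalize x.testBit (npc + k) = a
    generalize y.testBit (npc + k) = b
    generalize decide (k ≥ 12 - npc) = c
    generalize x.testBit (k - (12 - npc)) = d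
    generalize y.testBit (k - (12 - npc)) = e
    generalize Nat.testBit 4095 k = p
    generalize Nat.testBit 3142 k = q
    cases a <;> cases b <;> cases c <;> cases d <;> cases e <;> cases p <;> cases q <;> rfl
  simp only [pvF, h]
  rw [Bool.eq_iff_iff]
  simp [pvLor_eq_zero]

lemma pvF_foldl (npc : Nat) (g : Int → Nat) (l : List Int) (m : Nat) :
    pvF npc (l.foldl (fun acc c => acc ||| g c) m) =
      (pvF npc m || l.any (fun c => pvF npc (g c))) := by
  induction l generalizing m with
  | nil => simp
  | cons c rest ih =>
    simp only [List.foldl_cons, List.any_cons, ih, pvF_lor, Bool.or_assoc]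

-- per-element agreement of A's test and B's single-bit mask test
lemma pvChain_eq_F (a b : Int) (ha : 0 ≤ a ∧ a < 12) (hb : 0 ≤ b ∧ b < 12) :
    pvChain a b = pvF a.toNat (1 <<< b.toNat) := by
  obtain ⟨ha0, ha1⟩ := ha
  obtain ⟨hb0, hb1⟩ := hb
  interval_cases a <;> interval_cases b <;> decide

-- ===== VERDICT (by name: the statement is the Claim_ definition above) =====
theorem is_dissonant_with_chord_py_spec : Claim_equal_is_dissonant_with_chord_py := by
  intro note l _
  unfold Spec_is_dissonant_with_chord_py
  rw [is_dissonant_with_chord_py]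
  show pvALoop (PySem.Int.mod note 12) l = _
  rw [pvALoop_eq_any, is_dissonant_with_chord_py_alt]
  show _ = pvF (PySem.Int.mod note 12).toNat
      (l.foldl (fun m c => m ||| (1 <<< (PySem.Int.mod c 12).toNat)) 0)
  rw [pvF_foldl, pvF_zero, Bool.false_or]
  have hfun : (fun c => pvChain (PySem.Int.mod note 12) (PySem.Int.mod c 12)) =
      (fun c => pvF (PySem.Int.mod note 12).toNat (1 <<< (PySem.Int.mod c 12).toNat)) :=
    funext fun c => pvChain_eq_F _ _ (pvMod12_bounds note) (pvMod12_bounds c)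
  rw [hfun]
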